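-- pv_equiv track=rewrite | github.com/chnlyi/i2b2 | data_process.py | get_cat_ind_labels
-- ===== SOURCE A (Python) =====
-- def get_cat_ind_labels(label):
--     c = '.'
--     positions = [pos for pos, char in enumerate(label) if char == c]
--     if label != 'O':
--         sl = slice(positions[0]+1,positions[2])
--         cat_ind_label = label[sl]
--     else:
--         cat_ind_label = label
--     return cat_ind_label
-- ===== SOURCE B (Python) =====
-- def get_cat_ind_labels(label):
--     if label != 'O':
--         parts = label.split('.')
--         return parts[1] + '.' + parts[2]
--     return label
-- ===== Notes on version B (the rewrite author's own statement) =====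
-- stated objective: idiomatic
-- what changed: B tokenizes the label with str.split('.') and rejoins fields 1 and 2, instead of building a list of all dot positions via enumerate and slicing by offsets.
import Mathlib
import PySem

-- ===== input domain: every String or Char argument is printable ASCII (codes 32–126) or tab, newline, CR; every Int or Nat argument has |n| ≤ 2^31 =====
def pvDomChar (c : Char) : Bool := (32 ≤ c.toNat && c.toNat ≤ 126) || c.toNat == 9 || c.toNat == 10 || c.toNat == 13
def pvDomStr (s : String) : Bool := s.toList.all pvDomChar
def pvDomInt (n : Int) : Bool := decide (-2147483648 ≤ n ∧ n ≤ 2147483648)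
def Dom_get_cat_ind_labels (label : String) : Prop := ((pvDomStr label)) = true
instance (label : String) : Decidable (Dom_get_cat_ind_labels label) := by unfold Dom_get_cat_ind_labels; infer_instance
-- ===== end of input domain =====

-- B splits the label on '.' and rejoins fields 1 and 2 (idiomatic), instead of
-- collecting all dot positions via enumerate and slicing between the first and third.


-- ===== PORT A =====
def get_cat_ind_labels (label : String) : String :=
  let positions : List Int :=
    ((PySem.List.enumerate label.toList).filter (fun p => p.2 == '.')).map (·.1)
  if label ≠ "O" then
    match PySem.List.pyGet? positions 0, PySem.List.pyGet? positions 2 with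
    | some p0, some p2 =>
        String.ofList (PySem.List.slice label.toList (some (p0 + 1)) (some p2))
    | _, _ => ""   -- IndexError on positions[0]/positions[2]: excluded by Pre_
  else label

-- ===== PORT B =====
def get_cat_ind_labels_alt (label : String) : String :=
  if label ≠ "O" then
    let parts : List (List Char) := PySem.Chars.splitOn label.toList ['.']
    match PySem.List.pyGet? parts 1 with
    | none => ""   -- IndexError on parts[1]: excluded by Pre_
    | some p1 =>
      match PySem.List.pyGet? parts 2 with
      | none => ""   -- IndexError on parts[2]: excluded by Pre_
      | some p2 => String.ofList (p1 ++ '.' :: p2)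
  else label

-- ===== PRECONDITION & SPEC =====
-- A raises IndexError when label ≠ 'O' has fewer than three dots; Pre_ excludes exactly those.
def Pre_get_cat_ind_labels (label : String) : Prop :=
  label = "O" ∨ 3 ≤ label.toList.count '.'
instance (label : String) : Decidable (Pre_get_cat_ind_labels label) := by
  unfold Pre_get_cat_ind_labels; infer_instance
def pvWitness_get_cat_ind_labels : String := "problem.cat.1.present"

def Spec_get_cat_ind_labels (label : String) (out : String) : Prop :=
  out = get_cat_ind_labels_alt label
instance (label : String) (out : String) : Decidable (Spec_get_cat_ind_labels label out) := by
  unfold Spec_get_cat_ind_labels; infer_instance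

-- ===== CLAIM (what is proved, stated in full; the proofs are below) =====
def Claim_equal_get_cat_ind_labels : Prop :=
  ∀ (label : String), Dom_get_cat_ind_labels label → Pre_get_cat_ind_labels label →
    Spec_get_cat_ind_labels label (get_cat_ind_labels label)

-- ===== LEMMAS AND PROOFS =====

/-- Reference single-char split on '.', structural on the list. -/
def pvSplit : List Char → List (List Char)
  | [] => [[]]
  | c :: r => if c = '.' then [] :: pvSplit r else (pvSplit r).modifyHead (c :: ·)

theorem pvSplit_ne_nil (l : List Char) : pvSplit l ≠ [] := by
  induction l with
  | nil => simp [pvSplit]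
  | cons c r ih =>
    simp only [pvSplit]
    split_ifs
    · simp
    · cases h : pvSplit r with
      | nil => exact absurd h ih
      | cons x xs => simp [List.modifyHead]

theorem pvSplit_go (fuel : Nat) :
    ∀ (l cur : List Char) (acc : List (List Char)), l.length < fuel →
      PySem.Chars.splitOn.go ['.'] fuel l cur acc =
        acc.reverse ++ (pvSplit l).modifyHead (cur.reverse ++ ·) := by
  induction fuel with
  | zero => intro l cur acc h; omega
  | succ n ih =>
    intro l cur acc h
    cases l with
    | nil =>
      simp [PySem.Chars.splitOn.go, pvSplit, List.modifyHead]
    | cons c r =>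
      by_cases hc : c = '.'
      · subst hc
        rw [show PySem.Chars.splitOn.go ['.'] (n+1) ('.' :: r) cur acc =
              PySem.Chars.splitOn.go ['.'] n r [] (cur.reverse :: acc) by
            simp [PySem.Chars.splitOn.go, List.isPrefixOf]]
        rw [ih r [] (cur.reverse :: acc) (by simpa using Nat.lt_of_succ_lt_succ h)]
        simp [pvSplit, List.modifyHead]
        cases hs : pvSplit r <;> simp [List.modifyHead]
      · have hc' : '.' ≠ c := Ne.symm hc
        rw [show PySem.Chars.splitOn.go ['.'] (n+1) (c :: r) cur acc =
              PySem.Chars.splitOn.go ['.'] n r (c :: cur) acc by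
            simp [PySem.Chars.splitOn.go, List.isPrefixOf, hc']]
        rw [ih r (c :: cur) acc (by simpa using Nat.lt_of_succ_lt_succ h)]
        simp only [pvSplit, if_neg hc]
        cases hs : pvSplit r with
        | nil => exact absurd hs (pvSplit_ne_nil r)
        | cons x xs => simp [List.modifyHead]

theorem splitOn_eq_pvSplit (l : List Char) :
    PySem.Chars.splitOn l ['.'] = pvSplit l := by
  have := pvSplit_go (l.length + 1) l [] [] (by omega)
  simp only [List.reverse_nil, List.nil_append] at this
  rw [show PySem.Chars.splitOn l ['.'] = PySem.Chars.splitOn.go ['.'] (l.length + 1) l [] [] from rfl, this]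
  cases h : pvSplit l with
  | nil => exact absurd h (pvSplit_ne_nil l)
  | cons x xs => simp [List.modifyHead]

theorem pvSplit_append_dot (a r : List Char) (ha : '.' ∉ a) :
    pvSplit (a ++ '.' :: r) = a :: pvSplit r := by
  induction a with
  | nil => simp [pvSplit]
  | cons c a' ih =>
    have hc : c ≠ '.' := fun h => ha (h ▸ List.mem_cons_self ..)
    have ha' : '.' ∉ a' := fun h => ha (List.mem_cons_of_mem _ h)
    simp only [List.cons_append, pvSplit, if_neg hc, ih ha', List.modifyHead]

theorem positions_append_dot (a r : List Char) (s : Int) (ha : '.' ∉ a) :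
    ((PySem.List.enumerate (a ++ '.' :: r) s).filter (fun p => p.2 == '.')).map (·.1) =
      (s + a.length) ::
        ((PySem.List.enumerate r (s + a.length + 1)).filter (fun p => p.2 == '.')).map (·.1) := by
  induction a generalizing s with
  | nil => simp [PySem.List.enumerate_cons]
  | cons c a' ih =>
    have hc : c ≠ '.' := fun h => ha (h ▸ List.mem_cons_self ..)
    have ha' : '.' ∉ a' := fun h => ha (List.mem_cons_of_mem _ h)
    simp only [List.cons_append, PySem.List.enumerate_cons, List.filter_cons,
      show ((s, c).2 == '.') = false by simpa using hc, Bool.false_eq_true, if_false]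
    rw [ih (s + 1) ha']
    push_cast [List.length_cons]
    ring_nf

theorem exists_first_dot (l : List Char) (h : 1 ≤ l.count '.') :
    ∃ a r, l = a ++ '.' :: r ∧ '.' ∉ a ∧ l.count '.' = r.count '.' + 1 := by
  induction l with
  | nil => simp at h
  | cons c t ih =>
    by_cases hc : c = '.'
    · exact ⟨[], t, by simp [hc], by simp, by simp [hc]⟩
    · have ht : 1 ≤ t.count '.' := by
        simpa [List.count_cons, hc] using h
      obtain ⟨a, r, heq, ha, hcnt⟩ := ih ht
      refine ⟨c :: a, r, by simp [heq], ?_, by simp [hc, hcnt]⟩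
      intro hmem
      rcases List.mem_cons.mp hmem with h | h
      · exact hc h.symm
      · exact ha h

-- ===== VERDICT (by name: the statement is the Claim_ definition above) =====
theorem get_cat_ind_labels_spec : Claim_equal_get_cat_ind_labels := by
  intro label _ hpre
  unfold Spec_get_cat_ind_labels
  by_cases hO : label = "O"
  · simp [get_cat_ind_labels, get_cat_ind_labels_alt, hO]
  · have hcnt : 3 ≤ label.toList.count '.' := by
      rcases hpre with h | h
      · exact absurd h hO
      · exact h
    obtain ⟨a, r1, he1, ha, hc1⟩ := exists_first_dot label.toList (by omega)
    obtain ⟨b, r2, he2, hb, hc2⟩ := exists_first_dot r1 (by omega)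
    obtain ⟨c, d, he3, hc, _⟩ := exists_first_dot r2 (by omega)
    have hls : label.toList = a ++ '.' :: (b ++ '.' :: (c ++ '.' :: d)) := by
      rw [he1, he2, he3]
    -- A side
    have hposA := positions_append_dot a (b ++ '.' :: (c ++ '.' :: d)) 0 ha
    have hposB := positions_append_dot b (c ++ '.' :: d) (0 + (a.length : Int) + 1) hb
    have hposC := positions_append_dot c d (0 + (a.length : Int) + 1 + (b.length : Int) + 1) hc
    have hpos :
        ((PySem.List.enumerate label.toList 0).filter (fun p => p.2 == '.')).map (·.1) =
          (0 + (a.length : Int)) ::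
          (0 + (a.length : Int) + 1 + (b.length : Int)) ::
          (0 + (a.length : Int) + 1 + (b.length : Int) + 1 + (c.length : Int)) ::
          ((PySem.List.enumerate d
              (0 + (a.length : Int) + 1 + (b.length : Int) + 1 + (c.length : Int) + 1)).filter
              (fun p => p.2 == '.')).map (·.1) := by
      rw [hls, hposA, hposB, hposC]
    -- B side
    have hsplit : PySem.Chars.splitOn label.toList ['.'] = a :: b :: c :: pvSplit d := by
      rw [hls, splitOn_eq_pvSplit, pvSplit_append_dot _ _ ha,
        pvSplit_append_dot _ _ hb, pvSplit_append_dot _ _ hc]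
    simp only [get_cat_ind_labels, get_cat_ind_labels_alt, if_pos (by exact hO), hpos, hsplit]
    simp only [PySem.List.pyGet?_ofNat', List.getElem?_cons_zero, List.getElem?_cons_succ]
    -- now the slice computation
    simp only [zero_add]
    rw [PySem.List.slice_toNat]
    have hdrop : label.toList.drop ((a.length : Int) + 1).toNat = b ++ '.' :: (c ++ '.' :: d) := by
      have : ((a.length : Int) + 1).toNat = (a ++ ['.']).length := by
        simp only [List.length_append, List.length_cons, List.length_nil]; omega
      rw [hls, this, show a ++ '.' :: (b ++ '.' :: (c ++ '.' :: d)) =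
        (a ++ ['.']) ++ (b ++ '.' :: (c ++ '.' :: d)) by simp, List.drop_left]
    have htake : (((a.length : Int) + 1 + (b.length : Int) + 1 + (c.length : Int)).toNat -
        ((a.length : Int) + 1).toNat) = (b ++ '.' :: c).length := by
      simp only [List.length_append, List.length_cons]; omega
    rw [hdrop, htake, show b ++ '.' :: (c ++ '.' :: d) = (b ++ '.' :: c) ++ ('.' :: d) by simp,
      List.take_left]
    · positivity
    · positivity
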